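-- pv_equiv track=rewrite | github.com/DeepDiverGuy/print_all_pdfs | print_all_pdfs.py | get_back_pages
-- ===== SOURCE A (Python) =====
-- import math
--
-- def num_physical_sheets(total_pages):
--     """Total physical sheets needed for a PDF (each sheet holds 2 pages)."""
--     return math.ceil(total_pages / 2)
--
-- def get_back_pages(total_pages):
--     """
--     Pages printed on the BACK side (even-numbered physical sheets).
--     Sheet 2 = pages 3,4 | Sheet 4 = pages 7,8 | Sheet 6 = pages 11,12 | ...
--     """
--     num_sheets = num_physical_sheets(total_pages)
--     pages = []
--     for sheet_idx in range(1, num_sheets, 2):   # 0-based: 1,3,5,...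
--         p1 = sheet_idx * 2 + 1
--         p2 = p1 + 1
--         pages.append(p1)
--         if p2 <= total_pages:
--             pages.append(p2)
--     return pages
-- ===== SOURCE B (Python) =====
-- import math
--
-- def num_physical_sheets(total_pages):
--     """Total physical sheets needed for a PDF (each sheet holds 2 pages)."""
--     return math.ceil(total_pages / 2)
--
-- def get_back_pages(total_pages):
--     """
--     Pages printed on the BACK side (even-numbered physical sheets):
--     one pass over all candidate page numbers, keeping a page exactly when
--     its 0-based sheet index (p-1)//2 is odd and the page exists.
--     """
--     num_sheets = num_physical_sheets(total_pages)
--     return [p for p in range(1, 2 * num_sheets + 1)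
--             if (p - 1) // 2 % 2 == 1 and p <= total_pages]
-- ===== Notes on version B (the rewrite author's own statement) =====
-- stated objective: alternative
-- what changed: Replaces the loop over odd sheet indices that conditionally appends two pages per sheet with a single comprehension over all candidate page numbers 1..2*num_sheets, keeping a page exactly when its 0-based sheet index (p-1)//2 is odd and p <= total_pages.
import Mathlib
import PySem

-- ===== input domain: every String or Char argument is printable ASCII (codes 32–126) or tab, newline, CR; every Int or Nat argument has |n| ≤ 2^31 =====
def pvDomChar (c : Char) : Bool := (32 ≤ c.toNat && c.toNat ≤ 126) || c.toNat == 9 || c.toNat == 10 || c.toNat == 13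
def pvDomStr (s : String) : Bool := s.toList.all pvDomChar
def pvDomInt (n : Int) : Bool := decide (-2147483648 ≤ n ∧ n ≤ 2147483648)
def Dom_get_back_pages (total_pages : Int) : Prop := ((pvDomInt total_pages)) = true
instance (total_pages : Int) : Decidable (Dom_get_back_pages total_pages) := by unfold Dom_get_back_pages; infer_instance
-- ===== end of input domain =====

-- B replaces A's loop over odd sheets (two appends with a guard) by a single
-- per-page filter over all candidate pages, keeping a page when its sheet index
-- is odd and the page exists (objective: alternative decomposition, same cost).

-- ===== PORT A =====
-- math.ceil(total_pages / 2) on an int argument equals -((-total_pages) // 2);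
-- exact on the domain since float division by 2 is exact for |n| ≤ 2^31.
def num_physical_sheets (total_pages : Int) : Int :=
  -(PySem.Int.floordiv (-total_pages) 2)

def get_back_pages (total_pages : Int) : List Int :=
  let num_sheets := num_physical_sheets total_pages
  (PySem.List.pyRange 1 num_sheets 2).foldl
    (fun pages sheet_idx =>
      let p1 := sheet_idx * 2 + 1
      let p2 := p1 + 1
      let pages := pages ++ [p1]
      if p2 ≤ total_pages then pages ++ [p2] else pages)
    []

-- ===== PORT B =====
def get_back_pages_alt (total_pages : Int) : List Int :=
  let num_sheets := num_physical_sheets total_pages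
  (PySem.List.pyRange 1 (2 * num_sheets + 1) 1).filter
    (fun p => PySem.Int.mod (PySem.Int.floordiv (p - 1) 2) 2 == 1 && decide (p ≤ total_pages))

-- ===== PRECONDITION & SPEC =====
def Spec_get_back_pages (total_pages : Int) (out : List Int) : Prop := out = get_back_pages_alt total_pages
instance (total_pages : Int) (out : List Int) : Decidable (Spec_get_back_pages total_pages out) := by unfold Spec_get_back_pages; infer_instance

-- ===== CLAIM (what is proved, stated in full; the proofs are below) =====
def Claim_equal_get_back_pages : Prop := ∀ (total_pages : Int), Dom_get_back_pages total_pages → Spec_get_back_pages total_pages (get_back_pages total_pages)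

-- ===== LEMMAS AND PROOFS =====

theorem fd2 (a : Int) : PySem.Int.floordiv a 2 = a / 2 := by
  simp [PySem.Int.floordiv, Int.fdiv_eq_ediv]

-- the per-page filter of B
def qB (tp p : Int) : Bool :=
  PySem.Int.mod (PySem.Int.floordiv (p - 1) 2) 2 == 1 && decide (p ≤ tp)

theorem qB_even (tp a : Int) (h : (a - 1) / 2 % 2 = 0) : qB tp a = false := by
  simp [qB, h]

theorem qB_odd (tp a : Int) (h : (a - 1) / 2 % 2 = 1) : qB tp a = decide (a ≤ tp) := by
  simp [qB, h]

-- A's loop body appends a fixed block per sheet: foldl = flatMap of blocks.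
theorem foldA_eq_flatMap (tp : Int) (l acc : List Int) :
    l.foldl
      (fun pages sheet_idx =>
        let p1 := sheet_idx * 2 + 1
        let p2 := p1 + 1
        let pages := pages ++ [p1]
        if p2 ≤ tp then pages ++ [p2] else pages) acc
    = acc ++ l.flatMap (fun s => [s * 2 + 1] ++ if s * 2 + 1 + 1 ≤ tp then [s * 2 + 1 + 1] else []) := by
  induction l generalizing acc with
  | nil => simp
  | cons s l ih =>
    simp only [List.foldl_cons, List.flatMap_cons, ih]
    split_ifs <;> simp

-- the four new candidate pages of one odd/even sheet pair
theorem range4 (c : Nat) :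
    List.range (4 * c + 4) = List.range (4 * c) ++ [4 * c, 4 * c + 1, 4 * c + 2, 4 * c + 3] := by
  rw [List.range_add]
  norm_num [List.range_succ]

theorem e0_lem (tp : Int) (c : Nat) : qB tp (1 + ((4 * c : Nat) : Int)) = false := by
  apply qB_even; push_cast; omega

theorem e1_lem (tp : Int) (c : Nat) : qB tp (1 + ((4 * c + 1 : Nat) : Int)) = false := by
  apply qB_even; push_cast; omega

theorem e2_lem (tp : Int) (c : Nat) : qB tp (1 + ((4 * c + 2 : Nat) : Int)) = decide (1 + ((4 * c + 2 : Nat) : Int) ≤ tp) := by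
  apply qB_odd; push_cast; omega

theorem e3_lem (tp : Int) (c : Nat) : qB tp (1 + ((4 * c + 3 : Nat) : Int)) = decide (1 + ((4 * c + 3 : Nat) : Int) ≤ tp) := by
  apply qB_odd; push_cast; omega

theorem core (tp : Int) (c : Nat) (h : 4 * (c : Int) - 1 ≤ tp) :
    (List.range c).flatMap
      (fun k : Nat => [(1 + 2 * (k : Int)) * 2 + 1] ++
        if (1 + 2 * (k : Int)) * 2 + 1 + 1 ≤ tp then [(1 + 2 * (k : Int)) * 2 + 1 + 1] else [])
    = ((List.range (4 * c)).map (fun k : Nat => 1 + (k : Int))).filter (qB tp) := by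
  induction c with
  | zero => simp
  | succ c ih =>
    have hr : 4 * (c + 1) = 4 * c + 4 := by omega
    rw [hr, range4, List.range_succ, List.flatMap_append, List.map_append, List.filter_append,
        ← ih (by push_cast at h ⊢; omega)]
    congr 1
    simp only [List.flatMap_cons, List.flatMap_nil, List.append_nil, List.map_cons, List.map_nil,
      List.filter_cons, List.filter_nil, e0_lem, e1_lem, e2_lem, e3_lem]
    have h2 : (1 + ((4 * c + 2 : Nat) : Int) ≤ tp) := by push_cast at h ⊢; omega
    simp only [decide_eq_true_eq, h2, if_true, Bool.false_eq_true, if_false, decide_eq_true_eq]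
    split_ifs with ha hb hb
    · simp; omega
    · exfalso; push_cast at ha hb; omega
    · exfalso; push_cast at ha hb; omega
    · simp; omega

-- n = ceil(tp/2) sandwiches tp
theorem nps_bounds (tp : Int) :
    2 * num_physical_sheets tp - 1 ≤ tp ∧ tp ≤ 2 * num_physical_sheets tp := by
  simp only [num_physical_sheets, fd2]
  omega

theorem get_back_pages_eq (tp : Int) : get_back_pages tp = get_back_pages_alt tp := by
  obtain ⟨hlo, hhi⟩ := nps_bounds tp
  simp only [get_back_pages, get_back_pages_alt, foldA_eq_flatMap, List.nil_append]
  show _ = List.filter (qB tp) _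
  rcases le_or_gt (num_physical_sheets tp) 0 with hne | hpos
  · rw [PySem.List.pyRange_of_pos 1 _ (by norm_num),
        PySem.List.pyRange_one_eq_nil (by omega)]
    simp [show ¬ (1 < num_physical_sheets tp) from by omega]
  · obtain ⟨m, hm⟩ : ∃ m : Nat, num_physical_sheets tp = (m : Int) :=
      ⟨(num_physical_sheets tp).toNat, by omega⟩
    rw [PySem.List.pyRange_of_pos 1 _ (by norm_num), PySem.List.pyRange_one, List.flatMap_map]
    rcases Nat.even_or_odd m with ⟨c, hc⟩ | ⟨c, hc⟩
    · -- n = 2c : exactly 4c candidate pages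
      have hcount : (if 1 < num_physical_sheets tp then ((num_physical_sheets tp - 1 + 2 - 1) / 2).toNat else 0) = c := by
        rw [hm]; subst hc; push_cast; split_ifs <;> omega
      have hlen : (2 * num_physical_sheets tp + 1 - 1).toNat = 4 * c := by
        rw [hm]; subst hc; omega
      rw [hcount, hlen]
      exact core tp c (by rw [hm] at hlo; subst hc; push_cast at hlo ⊢; omega)
    · -- n = 2c+1 : two extra candidate pages on the last (even, front-side) sheet, filtered out
      have hcount : (if 1 < num_physical_sheets tp then ((num_physical_sheets tp - 1 + 2 - 1) / 2).toNat else 0) = c := by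
        rw [hm]; subst hc; push_cast; split_ifs <;> omega
      have hlen : (2 * num_physical_sheets tp + 1 - 1).toNat = 4 * c + 2 := by
        rw [hm]; subst hc; omega
      have hsplit : List.range (4 * c + 2) = List.range (4 * c) ++ [4 * c, 4 * c + 1] := by
        rw [List.range_add]
        norm_num [List.range_succ]
      rw [hcount, hlen, hsplit, List.map_append, List.filter_append]
      simp only [List.map_cons, List.map_nil, List.filter_cons, List.filter_nil,
        e0_lem, e1_lem, Bool.false_eq_true, if_false, List.append_nil]
      exact core tp c (by rw [hm] at hlo; subst hc; push_cast at hlo ⊢; omega)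

-- ===== VERDICT (by name: the statement is the Claim_ definition above) =====
theorem get_back_pages_spec : Claim_equal_get_back_pages := by
  intro tp _
  show get_back_pages tp = get_back_pages_alt tp
  exact get_back_pages_eq tp
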